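-- pv_equiv track=rewrite | github.com/upatras-lar/IBRICS_TRAM_fork | lib/pipeline/visualization.py | smooth_contact_flags
-- ===== SOURCE A (Python) =====
-- def smooth_contact_flags(flags, fill_gap=1, drop_spike=1):
--     """Fill short gaps and drop short spikes in a boolean contact sequence."""
--     if not flags:
--         return flags
--
--     cleaned = flags[:]
--     n = len(flags)
--
--     # Fill short gaps of no_contact between contacts.
--     i = 0
--     while i < n:
--         if cleaned[i]:
--             i += 1
--             continue
--         start = i
--         while i < n and not cleaned[i]:
--             i += 1
--         end = i
--         gap_len = end - start
--         left = start - 1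
--         right = end
--         if gap_len <= fill_gap and left >= 0 and right < n and cleaned[left] and cleaned[right]:
--             for j in range(start, end):
--                 cleaned[j] = True
--
--     # Drop short spikes of contact between no_contact.
--     i = 0
--     while i < n:
--         if not cleaned[i]:
--             i += 1
--             continue
--         start = i
--         while i < n and cleaned[i]:
--             i += 1
--         end = i
--         run_len = end - start
--         left = start - 1
--         right = end
--         if run_len <= drop_spike and left >= 0 and right < n and (not cleaned[left]) and (not cleaned[right]):
--             for j in range(start, end):
--                 cleaned[j] = False
--
--     return cleaned
-- ===== SOURCE B (Python) =====
-- def smooth_contact_flags(flags, fill_gap=1, drop_spike=1):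
--     """Fill short gaps and drop short spikes via a run-length encoding rebuild."""
--     if not flags:
--         return flags
--
--     def runs(seq):
--         r = []
--         i = 0
--         while i < len(seq):
--             j = i
--             while j < len(seq) and seq[j] == seq[i]:
--                 j += 1
--             r.append((seq[i], j - i))
--             i = j
--         return r
--
--     def smooth(seq, target, max_len):
--         r = runs(seq)
--         out = []
--         for k, (v, ln) in enumerate(r):
--             if v == target and ln <= max_len and 0 < k < len(r) - 1:
--                 out.extend([not target] * ln)
--             else:
--                 out.extend([v] * ln)
--         return out
--
--     return smooth(smooth(flags, False, fill_gap), True, drop_spike)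
-- ===== Notes on version B (the rewrite author's own statement) =====
-- stated objective: simpler
-- what changed: replaces A's two in-place index/while mutation passes (skip-scan inner loops plus range back-fill writes) by one generic run-length-encode-and-rebuild phase, applied once for gaps and once for spikes
import Mathlib
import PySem

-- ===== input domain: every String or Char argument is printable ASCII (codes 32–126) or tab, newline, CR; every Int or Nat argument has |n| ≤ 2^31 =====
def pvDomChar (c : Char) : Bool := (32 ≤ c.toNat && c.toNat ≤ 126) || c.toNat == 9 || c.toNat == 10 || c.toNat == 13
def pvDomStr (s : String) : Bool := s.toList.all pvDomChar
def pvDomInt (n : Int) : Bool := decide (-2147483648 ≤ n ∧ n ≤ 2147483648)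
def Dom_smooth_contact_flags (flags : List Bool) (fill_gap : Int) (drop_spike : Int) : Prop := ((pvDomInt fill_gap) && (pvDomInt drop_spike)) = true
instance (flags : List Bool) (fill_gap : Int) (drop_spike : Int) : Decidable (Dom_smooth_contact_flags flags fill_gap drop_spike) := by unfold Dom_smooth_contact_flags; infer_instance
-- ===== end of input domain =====

-- B replaces A's two in-place index/while mutation passes by one generic run-length-encode-and-rebuild
-- phase applied twice (objective: simpler); return values are proved equal on all inputs.

-- used only for termination of the ports' run-scanning recursions
theorem pvTakeWhileLenLe {α : Type} (p : α → Bool) (l : List α) :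
    (l.takeWhile p).length ≤ l.length := by
  induction l with
  | nil => simp
  | cons a l ih => rw [List.takeWhile_cons]; split <;> simp <;> omega

-- ===== PORT A =====

-- inner `while i < n and not cleaned[i]: i += 1` of the fill pass
def fillScan (n : Nat) (cleaned : List Bool) (i : Nat) : Nat :=
  if h : i < n ∧ cleaned.getD i false = false then fillScan n cleaned (i + 1) else i
termination_by n - i
decreasing_by omega

theorem fillScan_ge (n : Nat) (c : List Bool) (i : Nat) : i ≤ fillScan n c i := by
  fun_induction fillScan with
  | case1 i h ih => omega
  | case2 i h => omega

theorem fillScan_gt (n : Nat) (c : List Bool) (i : Nat) (h : i < n)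
    (hc : c.getD i false = false) : i < fillScan n c i := by
  rw [fillScan]
  have := fillScan_ge n c (i + 1)
  simp only [h, hc, and_self, dite_true]
  omega

-- outer fill-gaps while loop (recursion on the remaining indices)
def fillLoopA (fill_gap : Int) (n : Nat) (cleaned : List Bool) (i : Nat) : List Bool :=
  if h : i < n then
    if hc : cleaned.getD i false = true then fillLoopA fill_gap n cleaned (i + 1)
    else
      let start := i
      let e := fillScan n cleaned i
      let gap_len := e - start
      if ((gap_len : Int) ≤ fill_gap && 0 ≤ (start : Int) - 1 && decide (e < n)
            && cleaned.getD (start - 1) false && cleaned.getD e false) then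
        fillLoopA fill_gap n ((List.range' start gap_len).foldl (fun c j => c.set j true) cleaned) e
      else
        fillLoopA fill_gap n cleaned e
  else cleaned
termination_by n - i
decreasing_by
  · omega
  · have := fillScan_gt n cleaned i h (by simpa using hc); omega
  · have := fillScan_gt n cleaned i h (by simpa using hc); omega

-- inner `while i < n and cleaned[i]: i += 1` of the drop pass
def spikeScan (n : Nat) (cleaned : List Bool) (i : Nat) : Nat :=
  if h : i < n ∧ cleaned.getD i false = true then spikeScan n cleaned (i + 1) else i
termination_by n - i
decreasing_by omega

theorem spikeScan_ge (n : Nat) (c : List Bool) (i : Nat) : i ≤ spikeScan n c i := by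
  fun_induction spikeScan with
  | case1 i h ih => omega
  | case2 i h => omega

theorem spikeScan_gt (n : Nat) (c : List Bool) (i : Nat) (h : i < n)
    (hc : c.getD i false = true) : i < spikeScan n c i := by
  rw [spikeScan]
  have := spikeScan_ge n c (i + 1)
  simp only [h, hc, and_self, dite_true]
  omega

-- outer drop-spikes while loop
def dropLoopA (drop_spike : Int) (n : Nat) (cleaned : List Bool) (i : Nat) : List Bool :=
  if h : i < n then
    if hc : cleaned.getD i false = false then dropLoopA drop_spike n cleaned (i + 1)
    else
      let start := i
      let e := spikeScan n cleaned i
      let run_len := e - start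
      if ((run_len : Int) ≤ drop_spike && 0 ≤ (start : Int) - 1 && decide (e < n)
            && !(cleaned.getD (start - 1) false) && !(cleaned.getD e false)) then
        dropLoopA drop_spike n ((List.range' start run_len).foldl (fun c j => c.set j false) cleaned) e
      else
        dropLoopA drop_spike n cleaned e
  else cleaned
termination_by n - i
decreasing_by
  · omega
  · have := spikeScan_gt n cleaned i h (by simpa using hc); omega
  · have := spikeScan_gt n cleaned i h (by simpa using hc); omega

def smooth_contact_flags (flags : List Bool) (fill_gap : Int) (drop_spike : Int) : List Bool :=
  if flags.isEmpty then flags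
  else
    let n := flags.length
    let cleaned := fillLoopA fill_gap n flags 0
    dropLoopA drop_spike n cleaned 0

-- ===== PORT B =====

-- `runs(seq)`: peel one maximal run at a time (the index pair i/j of Source B becomes the suffix)
def runsB (seq : List Bool) : List (Bool × Nat) :=
  match seq with
  | [] => []
  | x :: rest =>
    let k := ((x :: rest).takeWhile (fun y => y == x)).length
    (x, k) :: runsB ((x :: rest).drop k)
termination_by seq.length
decreasing_by
  have := pvTakeWhileLenLe (fun y => y == x) rest
  simp [List.takeWhile_cons]

-- `smooth(seq, target, max_len)`: rebuild from the runs, flipping short interior target runs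
def smoothB (seq : List Bool) (target : Bool) (max_len : Int) : List Bool :=
  let r := runsB seq
  (PySem.List.enumerate r).foldl
    (fun out kv =>
      out ++ (if kv.2.1 == target && ((kv.2.2 : Int) ≤ max_len)
                 && (0 < kv.1 && kv.1 < (r.length : Int) - 1) then
                List.replicate kv.2.2 (!target)
              else
                List.replicate kv.2.2 kv.2.1))
    []

def smooth_contact_flags_alt (flags : List Bool) (fill_gap : Int) (drop_spike : Int) : List Bool :=
  if flags.isEmpty then flags
  else smoothB (smoothB flags false fill_gap) true drop_spike

-- ===== PRECONDITION & SPEC =====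
def Spec_smooth_contact_flags (flags : List Bool) (fill_gap : Int) (drop_spike : Int) (out : List Bool) : Prop := out = smooth_contact_flags_alt flags fill_gap drop_spike
instance (flags : List Bool) (fill_gap : Int) (drop_spike : Int) (out : List Bool) : Decidable (Spec_smooth_contact_flags flags fill_gap drop_spike out) := by unfold Spec_smooth_contact_flags; infer_instance

-- ===== CLAIM (what is proved, stated in full; the proofs are below) =====
def Claim_equal_smooth_contact_flags : Prop := ∀ (flags : List Bool) (fill_gap : Int) (drop_spike : Int), Dom_smooth_contact_flags flags fill_gap drop_spike → Spec_smooth_contact_flags flags fill_gap drop_spike (smooth_contact_flags flags fill_gap drop_spike)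

-- ===== LEMMAS AND PROOFS =====

-- the common functional core both programs compute, one pass:
-- flip every maximal run of `t`s of length ≤ g that has an element on both sides; `L` says
-- whether the element just before the current suffix exists and equals !t.
def phaseSpec (t : Bool) (g : Int) : Bool → List Bool → List Bool
  | _, [] => []
  | L, x :: rest =>
    if hx : x = t then
      let k := ((x :: rest).takeWhile (fun y => y == t)).length
      let rest' := (x :: rest).drop k
      if L = true ∧ rest' ≠ [] ∧ (k : Int) ≤ g then
        List.replicate k (!t) ++ phaseSpec t g true rest'
      else
        List.replicate k t ++ phaseSpec t g false rest'
    else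
      x :: phaseSpec t g true rest
termination_by _ s => s.length
decreasing_by
  · have := pvTakeWhileLenLe (fun y => y == t) rest
    subst hx
    simp [List.takeWhile_cons]
  · have := pvTakeWhileLenLe (fun y => y == t) rest
    subst hx
    simp [List.takeWhile_cons]
  · simp

-- same core on the run list
def emitR (t : Bool) (g : Int) : Bool → List (Bool × Nat) → List Bool
  | _, [] => []
  | hl, (v, k) :: rest =>
    (if v = t ∧ hl = true ∧ rest ≠ [] ∧ (k : Int) ≤ g then List.replicate k (!t)
     else List.replicate k v) ++ emitR t g true rest

-- ---- small list facts ----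

theorem pvTakeWhileEqReplicate (a : Bool) (l : List Bool) :
    l.takeWhile (fun y => y == a) = List.replicate (l.takeWhile (fun y => y == a)).length a := by
  rw [List.eq_replicate_iff]
  exact ⟨rfl, fun b hb => by simpa using List.mem_takeWhile_imp hb⟩

theorem pvDropTakeWhileLen {α : Type} (p : α → Bool) (l : List α) :
    l.drop (l.takeWhile p).length = l.dropWhile p := by
  induction l with
  | nil => simp
  | cons a l ih =>
    rw [List.takeWhile_cons, List.dropWhile_cons]
    split <;> simp [ih]

theorem pvTakeTakeWhileLen {α : Type} (p : α → Bool) (l : List α) :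
    l.take (l.takeWhile p).length = l.takeWhile p := by
  induction l with
  | nil => simp
  | cons a l ih =>
    rw [List.takeWhile_cons]
    split <;> simp [ih]

theorem pvDropWhileHead {α : Type} (p : α → Bool) (l : List α) (y : α) (ys : List α)
    (h : l.dropWhile p = y :: ys) : p y = false := by
  induction l with
  | nil => simp at h
  | cons a l ih =>
    rw [List.dropWhile_cons] at h
    split at h
    · exact ih h
    · cases h; simp_all

theorem pvGetDHeadDrop (l : List Bool) (n : Nat) :
    l.getD n false = ((l.drop n).headD false) := by
  simp [List.getD_eq_getElem?_getD, List.headD_eq_head?_getD, List.head?_drop]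

theorem pvFoldlSetRange (v : Bool) : ∀ (k : Nat) (c : List Bool) (s : Nat), s + k ≤ c.length →
    (List.range' s k).foldl (fun c j => c.set j v) c
      = c.take s ++ List.replicate k v ++ c.drop (s + k) := by
  intro k
  induction k with
  | zero => intro c s h; simp
  | succ k ih =>
    intro c s h
    rw [List.range'_1_concat, List.foldl_append, ih c s (by omega), List.foldl_cons, List.foldl_nil]
    have hlen : (c.take s ++ List.replicate k v).length = s + k := by simp; omega
    rw [List.set_append_right _ _ (by rw [hlen])]
    rw [List.drop_eq_getElem_cons (by omega : s + k < c.length), hlen, Nat.sub_self,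
      List.set_cons_zero]
    rw [List.replicate_succ' (n := k)]
    simp [List.append_assoc]
    omega

theorem phaseSpec_length (t : Bool) (g : Int) : ∀ (L : Bool) (s : List Bool),
    (phaseSpec t g L s).length = s.length := by
  intro L s
  fun_induction phaseSpec with
  | case1 => rfl
  | case2 L rest h ih =>
    have hk := pvTakeWhileLenLe (fun y => y == t) (t :: rest)
    simp only [List.length_append, List.length_replicate, ih, List.length_drop,
      List.length_cons] at *
    omega
  | case3 L rest h ih =>
    have hk := pvTakeWhileLenLe (fun y => y == t) (t :: rest)
    simp only [List.length_append, List.length_replicate, ih, List.length_drop,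
      List.length_cons] at *
    omega
  | case4 L x rest h ih => simp [ih]

theorem phaseSpec_nil (t : Bool) (g : Int) (L : Bool) : phaseSpec t g L [] = [] := by
  simp [phaseSpec]

theorem phaseSpec_cons_ne (t : Bool) (g : Int) (L : Bool) (x : Bool) (rest : List Bool)
    (h : x ≠ t) : phaseSpec t g L (x :: rest) = x :: phaseSpec t g true rest := by
  rw [phaseSpec]
  simp [h]

theorem phaseSpec_cons_run (t : Bool) (g : Int) (L : Bool) (rest : List Bool) :
    phaseSpec t g L (t :: rest)
      = (if L = true ∧ (t :: rest).drop ((t :: rest).takeWhile (fun y => y == t)).length ≠ []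
              ∧ (((t :: rest).takeWhile (fun y => y == t)).length : Int) ≤ g then
           List.replicate ((t :: rest).takeWhile (fun y => y == t)).length (!t)
             ++ phaseSpec t g true ((t :: rest).drop ((t :: rest).takeWhile (fun y => y == t)).length)
         else
           List.replicate ((t :: rest).takeWhile (fun y => y == t)).length t
             ++ phaseSpec t g false ((t :: rest).drop ((t :: rest).takeWhile (fun y => y == t)).length)) := by
  rw [phaseSpec]
  simp

-- ---- generic form of A's two loops ----

def genScan (t : Bool) (n : Nat) (c : List Bool) (i : Nat) : Nat :=
  if h : i < n ∧ c.getD i false = t then genScan t n c (i + 1) else i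
termination_by n - i
decreasing_by omega

theorem genScan_ge (t : Bool) (n : Nat) (c : List Bool) (i : Nat) : i ≤ genScan t n c i := by
  fun_induction genScan with
  | case1 i h ih => omega
  | case2 i h => omega

theorem genScan_gt (t : Bool) (n : Nat) (c : List Bool) (i : Nat) (h : i < n)
    (hc : c.getD i false = t) : i < genScan t n c i := by
  rw [genScan]
  have := genScan_ge t n c (i + 1)
  simp only [h, hc, and_self, dite_true]
  omega

def genLoop (t : Bool) (g : Int) (n : Nat) (c : List Bool) (i : Nat) : List Bool :=
  if h : i < n then
    if hc : c.getD i false = !t then genLoop t g n c (i + 1)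
    else
      let e := genScan t n c i
      if ((((e - i : Nat) : Int) ≤ g) && 0 ≤ (i : Int) - 1 && decide (e < n)
            && (c.getD (i - 1) false == !t) && (c.getD e false == !t)) then
        genLoop t g n ((List.range' i (e - i)).foldl (fun c j => c.set j (!t)) c) e
      else genLoop t g n c e
  else c
termination_by n - i
decreasing_by
  · omega
  · have hct : c.getD i false = t := by cases t <;> simp_all
    have h1 : i < genScan t n c i := genScan_gt t n c i h hct
    omega
  · have hct : c.getD i false = t := by cases t <;> simp_all
    have h1 : i < genScan t n c i := genScan_gt t n c i h hct
    omega

theorem fillScan_eq_gen (n : Nat) (c : List Bool) (i : Nat) :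
    fillScan n c i = genScan false n c i := by
  fun_induction fillScan with
  | case1 i h ih => rw [genScan]; simp only [h, and_self, dite_true]; exact ih
  | case2 i h => rw [genScan]; simp only [dif_neg h]

theorem spikeScan_eq_gen (n : Nat) (c : List Bool) (i : Nat) :
    spikeScan n c i = genScan true n c i := by
  fun_induction spikeScan with
  | case1 i h ih => rw [genScan]; simp only [h, and_self, dite_true]; exact ih
  | case2 i h => rw [genScan]; simp only [dif_neg h]

theorem fillLoopA_eq_gen (g : Int) (n : Nat) (c : List Bool) (i : Nat) :
    fillLoopA g n c i = genLoop false g n c i := by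
  fun_induction fillLoopA with
  | case1 c i h1 h ih =>
    rw [genLoop, dif_pos h1, dif_pos (by simpa using h)]
    exact ih
  | case2 c i h1 h2 start e gap_len h ih =>
    rw [genLoop, dif_pos h1, dif_neg (by simpa using h2)]
    rw [← fillScan_eq_gen]
    simp only [Bool.not_false, beq_true]
    rw [if_pos h]
    exact ih
  | case3 c i h1 h2 start e gap_len h ih =>
    rw [genLoop, dif_pos h1, dif_neg (by simpa using h2)]
    rw [← fillScan_eq_gen]
    simp only [Bool.not_false, beq_true]
    rw [if_neg h]
    exact ih
  | case4 c i h1 => rw [genLoop, dif_neg h1]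

theorem dropLoopA_eq_gen (g : Int) (n : Nat) (c : List Bool) (i : Nat) :
    dropLoopA g n c i = genLoop true g n c i := by
  fun_induction dropLoopA with
  | case1 c i h1 h ih =>
    rw [genLoop, dif_pos h1, dif_pos (by simpa using h)]
    exact ih
  | case2 c i h1 h2 start e run_len h ih =>
    rw [genLoop, dif_pos h1, dif_neg (by simpa using h2)]
    rw [← spikeScan_eq_gen]
    simp only [Bool.not_true, beq_false]
    rw [if_pos h]
    exact ih
  | case3 c i h1 h2 start e run_len h ih =>
    rw [genLoop, dif_pos h1, dif_neg (by simpa using h2)]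
    rw [← spikeScan_eq_gen]
    simp only [Bool.not_true, beq_false]
    rw [if_neg h]
    exact ih
  | case4 c i h1 => rw [genLoop, dif_neg h1]

theorem genScan_eq (t : Bool) (c : List Bool) : ∀ (m i : Nat), c.length ≤ i + m → i ≤ c.length →
    genScan t c.length c i = i + ((c.drop i).takeWhile (fun y => y == t)).length := by
  intro m
  induction m with
  | zero =>
    intro i h1 h2
    have hi : i = c.length := by omega
    rw [genScan]
    subst hi
    simp
  | succ m ih =>
    intro i h1 h2
    by_cases hlt : i < c.length
    · have hd := List.drop_eq_getElem_cons (l := c) (i := i) hlt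
      have hg := List.getD_eq_getElem c false hlt
      rw [← hg] at hd
      by_cases hgi : c.getD i false = t
      · rw [genScan, dif_pos ⟨hlt, hgi⟩, ih (i + 1) (by omega) (by omega)]
        rw [hd, List.takeWhile_cons]
        have hx : (c.getD i false == t) = true := by rw [hgi]; simp
        rw [hx]
        simp
        omega
      · rw [genScan, dif_neg (by rintro ⟨-, h⟩; exact hgi h)]
        rw [hd, List.takeWhile_cons]
        have hx : (c.getD i false == t) = false := by simpa using hgi
        rw [hx]
        simp
    · rw [genScan, dif_neg (by rintro ⟨h, -⟩; exact hlt h)]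
      have hi : i = c.length := by omega
      subst hi
      simp

-- main loop invariant: A's loop, started at a position that is not strictly inside a t-run,
-- computes take ++ phaseSpec of the suffix
set_option maxHeartbeats 2000000 in
theorem genLoop_eq (t : Bool) (g : Int) : ∀ (m : Nat) (c : List Bool) (i : Nat),
    c.length ≤ i + m → i ≤ c.length →
    (i < c.length → c.getD i false = t → (0 < i ∧ c.getD (i - 1) false = !t) ∨ i = 0) →
    genLoop t g c.length c i
      = c.take i ++ phaseSpec t g (decide (0 < i) && (c.getD (i - 1) false == !t)) (c.drop i) := by
  intro m
  induction m with
  | zero =>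
    intro c i h1 h2 hinv
    have hi : i = c.length := by omega
    rw [genLoop, dif_neg (by omega)]
    subst hi
    simp [phaseSpec_nil]
  | succ m ih =>
    intro c i h1 h2 hinv
    by_cases hlt : i < c.length
    swap
    · rw [genLoop, dif_neg hlt]
      have hi : i = c.length := by omega
      subst hi
      simp [phaseSpec_nil]
    rw [genLoop, dif_pos hlt]
    have hg := List.getD_eq_getElem c false hlt
    have hd := List.drop_eq_getElem_cons (l := c) (i := i) hlt
    rw [← hg] at hd
    by_cases hct : c.getD i false = t
    swap
    -- the current element is not `t`: single step
    · have hne : c.getD i false = !t := by cases t <;> simp_all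
      rw [dif_pos hne]
      rw [ih c (i + 1) (by omega) (by omega)
        (by intro _ _; exact Or.inl ⟨by omega, by simpa using hne⟩)]
      rw [hd, phaseSpec_cons_ne t g _ _ _ (by cases t <;> simp_all)]
      have htk : c.take (i + 1) = c.take i ++ [c.getD i false] := by
        rw [List.take_succ, hg]
        simp [List.getElem?_eq_getElem hlt]
      rw [htk]
      have hflag : (decide (0 < i + 1) && (c.getD (i + 1 - 1) false == !t)) = true := by
        have e0 : i + 1 - 1 = i := by omega
        rw [e0, hne]
        simp
      rw [hflag]
      simp
    -- at the start of a maximal run of `t`s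
    · rw [dif_neg (show ¬ c.getD i false = !t by cases t <;> simp_all)]
      rw [hct] at hd
      have he : genScan t c.length c i = i + ((c.drop i).takeWhile (fun y => y == t)).length :=
        genScan_eq t c c.length i (by omega) (by omega)
      obtain ⟨k, hk⟩ : ∃ k', k' = ((c.drop i).takeWhile (fun y => y == t)).length := ⟨_, rfl⟩
      rw [← hk] at he
      have hkle : k ≤ c.length - i := by
        have h' := pvTakeWhileLenLe (fun y => y == t) (c.drop i)
        rw [List.length_drop, ← hk] at h'
        exact h'
      have hk1 : 1 ≤ k := by
        rw [hk, hd, List.takeWhile_cons]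
        simp
      have htw : (c.drop i).takeWhile (fun y => y == t) = List.replicate k t := by
        have h' := pvTakeWhileEqReplicate t (c.drop i)
        rw [← hk] at h'
        exact h'
      have hdw : c.drop (i + k) = (c.drop i).dropWhile (fun y => y == t) := by
        have h' := pvDropTakeWhileLen (fun y => y == t) (c.drop i)
        rw [List.drop_drop, ← hk] at h'
        exact h'
      have hsplit : c.drop i = List.replicate k t ++ c.drop (i + k) := by
        rw [hdw, ← htw]
        exact (List.takeWhile_append_dropWhile).symm
      have htake : c.take (i + k) = c.take i ++ List.replicate k t := by
        rw [List.take_add]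
        congr 1
        rw [hk, pvTakeTakeWhileLen, htw]
        simp
      have hgetDe : i + k < c.length → c.getD (i + k) false = !t := by
        intro hel
        rw [pvGetDHeadDrop]
        cases hcase : c.drop (i + k) with
        | nil => rw [List.drop_eq_nil_iff] at hcase; omega
        | cons y ys =>
          have hy := pvDropWhileHead (fun y => y == t) (c.drop i) y ys (by rw [← hdw, hcase])
          have hy' : y = !t := by revert hy; cases y <;> cases t <;> simp
          simp [hy']
      have hgetDe1 : c.getD (i + k - 1) false = t := by
        rw [pvGetDHeadDrop]
        have hstep : c.drop (i + k - 1) = (c.drop i).drop (k - 1) := by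
          rw [List.drop_drop]
          congr 1
          omega
        rw [hstep, hsplit, List.drop_append, List.drop_replicate]
        have e1 : k - (k - 1) = 1 := by omega
        rw [e1]
        simp
      rw [he]
      have hbne : (t == !t) = false := by cases t <;> rfl
      by_cases hcond : (decide (0 < i) && (c.getD (i - 1) false == !t)) = true
          ∧ c.drop (i + k) ≠ [] ∧ (k : Int) ≤ g
      · -- the run is flipped
        have hblt : i + k < c.length := by
          have h' := hcond.2.1
          rw [Ne, List.drop_eq_nil_iff] at h'
          omega
        have h0i : 0 < i := by
          have h' := hcond.1
          rcases hinv hlt hct with ⟨h0, -⟩ | hi0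
          · exact h0
          · subst hi0; simp at h'
        have hL' : c.getD (i - 1) false = !t := by
          rcases hinv hlt hct with ⟨-, hL⟩ | hi0
          · exact hL
          · omega
        have hbool : ((decide ((↑(i + k - i) : Int) ≤ g) && decide (0 ≤ (i : Int) - 1)
            && decide (i + k < c.length) && (c.getD (i - 1) false == !t)
            && (c.getD (i + k) false == !t)) = true) := by
          have e1 : i + k - i = k := by omega
          rw [e1]
          have d1 : decide ((k : Int) ≤ g) = true := by simpa using hcond.2.2
          have d2 : decide (0 ≤ (i : Int) - 1) = true := by simp; omega
          have d3 : decide (i + k < c.length) = true := by simpa using hblt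
          have d4 : (c.getD (i - 1) false == !t) = true := by rw [hL']; simp
          have d5 : (c.getD (i + k) false == !t) = true := by rw [hgetDe hblt]; simp
          rw [d1, d2, d3, d4, d5]
          rfl
        rw [if_pos hbool]
        have hrange : i + k - i = k := by omega
        have hc' := pvFoldlSetRange (!t) k c i (by omega)
        rw [hrange, hc']
        have hti : (c.take i).length = i := by rw [List.length_take]; omega
        have hpre : (c.take i ++ List.replicate k (!t)).length = i + k := by
          rw [List.length_append, hti, List.length_replicate]
        have hlen' : (c.take i ++ List.replicate k (!t) ++ c.drop (i + k)).length = c.length := by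
          rw [List.length_append, hpre, List.length_drop]
          omega
        have hdropc' : (c.take i ++ List.replicate k (!t) ++ c.drop (i + k)).drop (i + k)
            = c.drop (i + k) := List.drop_left' hpre
        have htakec' : (c.take i ++ List.replicate k (!t) ++ c.drop (i + k)).take (i + k)
            = c.take i ++ List.replicate k (!t) := List.take_left' hpre
        have hgetc'e1 : (c.take i ++ List.replicate k (!t) ++ c.drop (i + k)).getD (i + k - 1) false
            = !t := by
          rw [List.getD_append _ _ _ _ (by rw [hpre]; omega)]
          rw [List.getD_append_right _ _ _ _ (by rw [hti]; omega), hti]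
          exact List.getD_replicate _ (by omega)
        have hinv' : i + k < (c.take i ++ List.replicate k (!t) ++ c.drop (i + k)).length
            → (c.take i ++ List.replicate k (!t) ++ c.drop (i + k)).getD (i + k) false = t
            → (0 < i + k ∧ (c.take i ++ List.replicate k (!t) ++ c.drop (i + k)).getD (i + k - 1) false = !t)
              ∨ i + k = 0 := by
          intro _ _
          exact Or.inl ⟨by omega, hgetc'e1⟩
        have hih := ih (c.take i ++ List.replicate k (!t) ++ c.drop (i + k)) (i + k)
          (by rw [hlen']; omega) (by rw [hlen']; omega) hinv'
        rw [hlen'] at hih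
        rw [hih, htakec', hdropc', hgetc'e1]
        rw [hd, phaseSpec_cons_run, ← hd]
        have hdw2 : (c.drop i).drop k = c.drop (i + k) := List.drop_drop
        rw [← hk, hdw2, if_pos hcond]
        have hflag : (decide (0 < i + k) && ((!t) == !t)) = true := by
          simp
          omega
        rw [hflag]
        simp [List.append_assoc]
      · -- the run is not flipped
        have hbool : ¬ ((decide ((↑(i + k - i) : Int) ≤ g) && decide (0 ≤ (i : Int) - 1)
            && decide (i + k < c.length) && (c.getD (i - 1) false == !t)
            && (c.getD (i + k) false == !t)) = true) := by
          intro hb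
          apply hcond
          have e1 : i + k - i = k := by omega
          rw [e1] at hb
          simp only [Bool.and_eq_true, decide_eq_true_eq] at hb
          obtain ⟨⟨⟨⟨b1, b2⟩, b3⟩, b4⟩, -⟩ := hb
          refine ⟨by rw [b4, Bool.and_true]; simp; omega, ?_, b1⟩
          rw [Ne, List.drop_eq_nil_iff]
          omega
        rw [if_neg hbool]
        have hinv' : i + k < c.length → c.getD (i + k) false = t
            → (0 < i + k ∧ c.getD (i + k - 1) false = !t) ∨ i + k = 0 := by
          intro hel hctp
          rw [hgetDe hel] at hctp
          exact absurd hctp (Bool.not_ne_self t)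
        rw [ih c (i + k) (by omega) (by omega) hinv']
        rw [hd, phaseSpec_cons_run, ← hd]
        have hdw2 : (c.drop i).drop k = c.drop (i + k) := List.drop_drop
        rw [← hk, hdw2, if_neg hcond]
        have hflag : (decide (0 < i + k) && (c.getD (i + k - 1) false == !t)) = false := by
          rw [hgetDe1, hbne]
          simp
        rw [hflag, htake]
        simp [List.append_assoc]

-- ---- B equals the same core ----

theorem runsB_eq_nil_iff (s : List Bool) : runsB s = [] ↔ s = [] := by
  cases s <;> simp [runsB]

theorem runsB_cons (x : Bool) (rest : List Bool) :
    runsB (x :: rest) = (x, ((x :: rest).takeWhile (fun y => y == x)).length)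
      :: runsB ((x :: rest).drop ((x :: rest).takeWhile (fun y => y == x)).length) := by
  rw [runsB]

theorem phaseSpec_replicate_ne (t : Bool) (g : Int) (x : Bool) (h : x ≠ t) :
    ∀ (kk : Nat) (L : Bool) (r : List Bool), 1 ≤ kk →
    phaseSpec t g L (List.replicate kk x ++ r) = List.replicate kk x ++ phaseSpec t g true r := by
  intro kk
  induction kk with
  | zero => intro L r h1; omega
  | succ kk ih =>
    intro L r h1
    rw [List.replicate_succ, List.cons_append, phaseSpec_cons_ne t g L x _ h]
    rcases Nat.eq_zero_or_pos kk with h0 | h0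
    · subst h0; simp
    · rw [ih true r h0]
      simp

theorem emitR_flag_irrel (t : Bool) (g : Int) (a b : Bool) :
    ∀ (r : List (Bool × Nat)), (∀ v k rest, r = (v, k) :: rest → v ≠ t) →
    emitR t g a r = emitR t g b r := by
  intro r h
  match r with
  | [] => rfl
  | (v, k) :: rest =>
    have hv := h v k rest rfl
    simp [emitR, hv]

theorem phaseSpec_eq_emitR (t : Bool) (g : Int) : ∀ (m : Nat) (s : List Bool) (L : Bool),
    s.length ≤ m → phaseSpec t g L s = emitR t g L (runsB s) := by
  intro m
  induction m with
  | zero =>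
    intro s L hlen
    cases s with
    | nil => rw [phaseSpec_nil, show runsB ([] : List Bool) = [] from by rw [runsB]]; rfl
    | cons x rest => simp at hlen
  | succ m ih =>
    intro s L hlen
    cases s with
    | nil => rw [phaseSpec_nil, show runsB ([] : List Bool) = [] from by rw [runsB]]; rfl
    | cons x rest =>
      obtain ⟨k0, hk⟩ : ∃ k', k' = ((x :: rest).takeWhile (fun y => y == x)).length := ⟨_, rfl⟩
      obtain ⟨r', hr⟩ : ∃ r', r' = (x :: rest).drop k0 := ⟨_, rfl⟩
      have hk1 : 1 ≤ k0 := by rw [hk, List.takeWhile_cons]; simp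
      have hkle : k0 ≤ rest.length + 1 := by
        have h' := pvTakeWhileLenLe (fun y => y == x) (x :: rest)
        rw [← hk] at h'
        simpa using h'
      have hrepl : (x :: rest).takeWhile (fun y => y == x) = List.replicate k0 x := by
        have h' := pvTakeWhileEqReplicate x (x :: rest)
        rw [← hk] at h'
        exact h'
      have hdw : r' = (x :: rest).dropWhile (fun y => y == x) := by
        have h' := pvDropTakeWhileLen (fun y => y == x) (x :: rest)
        rw [← hk] at h'
        rw [hr, h']
      have hsplit : x :: rest = List.replicate k0 x ++ r' := by
        rw [hdw, ← hrepl]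
        exact (List.takeWhile_append_dropWhile).symm
      have hr'len : r'.length ≤ m := by
        rw [hr, List.length_drop]
        simp at hlen ⊢
        omega
      have hr'head : ∀ y ys, r' = y :: ys → (y == x) = false := by
        intro y ys hcase
        exact pvDropWhileHead (fun y => y == x) (x :: rest) y ys (by rw [← hdw, hcase])
      have hruns : runsB (x :: rest) = (x, k0) :: runsB r' := by
        rw [runsB_cons, ← hk, ← hr]
      by_cases hx : x = t
      · subst hx
        rw [phaseSpec_cons_run, ← hk, ← hr, hruns]
        by_cases hc : L = true ∧ r' ≠ [] ∧ (k0 : Int) ≤ g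
        · rw [if_pos hc]
          have hc' : x = x ∧ L = true ∧ runsB r' ≠ [] ∧ (k0 : Int) ≤ g :=
            ⟨rfl, hc.1, fun h => hc.2.1 ((runsB_eq_nil_iff r').mp h), hc.2.2⟩
          rw [emitR, if_pos hc', ih r' true hr'len]
        · rw [if_neg hc]
          have hc' : ¬ (x = x ∧ L = true ∧ runsB r' ≠ [] ∧ (k0 : Int) ≤ g) := by
            intro hcc
            exact hc ⟨hcc.2.1, fun h => hcc.2.2.1 ((runsB_eq_nil_iff r').mpr h), hcc.2.2.2⟩
          rw [emitR, if_neg hc', ih r' false hr'len]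
          congr 1
          apply emitR_flag_irrel
          intro v kv rv hcase
          cases hr'case : r' with
          | nil => rw [hr'case] at hcase; simp [runsB] at hcase
          | cons y ys =>
            have hy := hr'head y ys hr'case
            rw [hr'case, runsB_cons] at hcase
            injection hcase with h1 h2
            injection h1 with h3 h4
            rw [← h3]
            intro hyt
            rw [hyt] at hy
            simp at hy
      · rw [hruns]
        conv_lhs => rw [hsplit]
        rw [phaseSpec_replicate_ne t g x hx k0 L r' hk1]
        have hc' : ¬ (x = t ∧ L = true ∧ runsB r' ≠ [] ∧ (k0 : Int) ≤ g) := fun hcc => hx hcc.1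
        rw [emitR, if_neg hc', ih r' true hr'len]

theorem enum_flatMap_eq_emitR (t : Bool) (g : Int) (N : Nat) :
    ∀ (r : List (Bool × Nat)) (s : Int), 0 ≤ s → s + r.length = N →
    (PySem.List.enumerate r s).flatMap
      (fun kv => if kv.2.1 == t && ((kv.2.2 : Int) ≤ g)
                    && (0 < kv.1 && kv.1 < (N : Int) - 1) then
                   List.replicate kv.2.2 (!t)
                 else List.replicate kv.2.2 kv.2.1)
      = emitR t g (decide (0 < s)) r := by
  intro r
  induction r with
  | nil => intro s h0 hN; rw [PySem.List.enumerate_nil]; rfl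
  | cons vk rest ih =>
    intro s h0 hN
    obtain ⟨v, k⟩ := vk
    rw [PySem.List.enumerate_cons, List.flatMap_cons, emitR]
    rw [ih (s + 1) (by omega) (by rw [← hN]; simp; omega)]
    have hflag : decide (0 < s + 1) = true := by simp; omega
    rw [hflag]
    congr 1
    simp only [List.length_cons] at hN
    by_cases hc : v = t ∧ (decide (0 < s)) = true ∧ rest ≠ [] ∧ (k : Int) ≤ g
    · rw [if_pos hc]
      have hb : (v == t && decide ((k : Int) ≤ g) && (decide (0 < s) && decide (s < (N : Int) - 1)))
          = true := by
        have hrest : 0 < rest.length := List.length_pos_of_ne_nil hc.2.2.1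
        have h1 : (v == t) = true := by simp [hc.1]
        have h2 : decide ((k : Int) ≤ g) = true := by simp [hc.2.2.2]
        have h4 : decide (s < (N : Int) - 1) = true := by simp; omega
        rw [h1, h2, hc.2.1, h4]
        rfl
      rw [if_pos hb]
    · rw [if_neg hc]
      have hb : ¬ ((v == t && decide ((k : Int) ≤ g) && (decide (0 < s) && decide (s < (N : Int) - 1)))
          = true) := by
        intro hb
        apply hc
        simp only [Bool.and_eq_true, beq_iff_eq, decide_eq_true_eq] at hb
        obtain ⟨⟨b1, b2⟩, b3, b4⟩ := hb
        refine ⟨b1, by simp; omega, ?_, b2⟩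
        have : 0 < rest.length := by omega
        exact List.ne_nil_of_length_pos this
      rw [if_neg hb]

theorem smoothB_eq (seq : List Bool) (t : Bool) (g : Int) :
    smoothB seq t g = phaseSpec t g false seq := by
  rw [smoothB, PySem.List.foldl_append_eq_flatMap, List.nil_append]
  rw [phaseSpec_eq_emitR t g seq.length seq false (le_refl _)]
  have h := enum_flatMap_eq_emitR t g (runsB seq).length (runsB seq) 0 (by omega) (by simp)
  simpa using h

-- ===== VERDICT (by name: the statement is the Claim_ definition above) =====
theorem smooth_contact_flags_spec : Claim_equal_smooth_contact_flags := by
  intro flags fill_gap drop_spike _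
  unfold Spec_smooth_contact_flags
  rw [smooth_contact_flags, smooth_contact_flags_alt]
  by_cases hE : flags.isEmpty = true
  · rw [if_pos hE, if_pos hE]
  · rw [if_neg hE, if_neg hE]
    have hA1 : fillLoopA fill_gap flags.length flags 0 = phaseSpec false fill_gap false flags := by
      rw [fillLoopA_eq_gen]
      have h := genLoop_eq false fill_gap flags.length flags 0 (by omega) (by omega)
        (by intro _ _; exact Or.inr rfl)
      simpa using h
    have hlen1 : (phaseSpec false fill_gap false flags).length = flags.length :=
      phaseSpec_length _ _ _ _
    have hA2 : dropLoopA drop_spike flags.length (phaseSpec false fill_gap false flags) 0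
        = phaseSpec true drop_spike false (phaseSpec false fill_gap false flags) := by
      rw [dropLoopA_eq_gen]
      have h := genLoop_eq true drop_spike (phaseSpec false fill_gap false flags).length
        (phaseSpec false fill_gap false flags) 0 (by omega) (by omega)
        (by intro _ _; exact Or.inr rfl)
      rw [hlen1] at h
      simpa using h
    show dropLoopA drop_spike flags.length (fillLoopA fill_gap flags.length flags 0) 0
      = smoothB (smoothB flags false fill_gap) true drop_spike
    rw [hA1, hA2, smoothB_eq, smoothB_eq]
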